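-- pv_equiv track=rewrite | github.com/sohyeon-jeon/taxpass-ocr | mathpix_spacing.py | smart_lstrip_preserve_newlines
-- ===== SOURCE A (Python) =====
-- def smart_lstrip_preserve_newlines(texts):
--     cleaned = []
--     for text in texts:
--         lines = text.split('\n')
--         stripped_lines = [line.lstrip() for line in lines]
--         cleaned_text = '\n'.join(stripped_lines)
--         cleaned.append(cleaned_text)
--     return ''.join(cleaned)
-- ===== SOURCE B (Python) =====
-- def smart_lstrip_preserve_newlines(texts):
--     # single-pass state machine over characters; at_line_start tracks whether
--     # we are still in the leading-whitespace zone of the current line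
--     out = []
--     for text in texts:
--         at_line_start = True
--         for ch in text:
--             if ch == '\n':
--                 out.append(ch)
--                 at_line_start = True
--             elif at_line_start and ch.isspace():
--                 pass
--             else:
--                 out.append(ch)
--                 at_line_start = False
--     return ''.join(out)
-- ===== Notes on version B (the rewrite author's own statement) =====
-- stated objective: alternative
-- what changed: Replaced the per-text split('\n')/lstrip-per-line/join list pipeline with a single character-by-character state machine that skips whitespace while an at_line_start flag is set and resets the flag on '\n'.
import Mathlib
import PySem

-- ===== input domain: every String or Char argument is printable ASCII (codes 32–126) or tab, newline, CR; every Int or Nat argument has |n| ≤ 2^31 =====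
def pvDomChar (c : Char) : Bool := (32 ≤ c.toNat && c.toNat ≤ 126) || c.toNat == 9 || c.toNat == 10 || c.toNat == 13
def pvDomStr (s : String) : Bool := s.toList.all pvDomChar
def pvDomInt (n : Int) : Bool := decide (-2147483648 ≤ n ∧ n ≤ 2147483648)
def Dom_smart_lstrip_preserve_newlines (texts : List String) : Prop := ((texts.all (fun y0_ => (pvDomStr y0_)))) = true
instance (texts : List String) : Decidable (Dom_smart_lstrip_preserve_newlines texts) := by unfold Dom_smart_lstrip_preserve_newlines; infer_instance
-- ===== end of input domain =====

-- B replaces A's split/lstrip-per-line/join pipeline by a one-pass state machine; alternative decomposition, same cost.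

-- ===== PORT A =====
def smart_lstrip_preserve_newlines (texts : List String) : String :=
  let cleaned := texts.foldl (fun (cleaned : List (List Char)) text =>
    let lines := PySem.Chars.splitOn text.toList ['\n']
    let stripped_lines := lines.map PySem.Chars.lstrip
    let cleaned_text := PySem.Chars.join ['\n'] stripped_lines
    cleaned ++ [cleaned_text]) []
  String.ofList (PySem.Chars.join [] cleaned)

-- ===== PORT B =====
-- one step of the state machine: state = (emitted chars so far, at_line_start flag)
def pvStep (st : List Char × Bool) (ch : Char) : List Char × Bool :=
  if ch = '\n' then (st.1 ++ [ch], true)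
  else if st.2 && PySem.Chars.isspace ch then st
  else (st.1 ++ [ch], false)

def smart_lstrip_preserve_newlines_alt (texts : List String) : String :=
  let out := texts.foldl (fun (out : List Char) text =>
    (text.toList.foldl pvStep (out, true)).1) []
  String.ofList out

-- ===== PRECONDITION & SPEC =====
def Spec_smart_lstrip_preserve_newlines (texts : List String) (out : String) : Prop := out = smart_lstrip_preserve_newlines_alt texts
instance (texts : List String) (out : String) : Decidable (Spec_smart_lstrip_preserve_newlines texts out) := by unfold Spec_smart_lstrip_preserve_newlines; infer_instance

-- ===== CLAIM (what is proved, stated in full; the proofs are below) =====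
def Claim_equal_smart_lstrip_preserve_newlines : Prop := ∀ (texts : List String), Dom_smart_lstrip_preserve_newlines texts → Spec_smart_lstrip_preserve_newlines texts (smart_lstrip_preserve_newlines texts)

-- ===== LEMMAS AND PROOFS =====

-- clean recursive characterisation of splitOn · ['\n']
def pvSplit : List Char → List (List Char)
  | [] => [[]]
  | c :: cs =>
    if c = '\n' then [] :: pvSplit cs
    else (c :: (pvSplit cs).headI) :: (pvSplit cs).tail

-- clean recursive characterisation of the state machine's output from flag b
def pvM : Bool → List Char → List Char
  | _, [] => []
  | b, c :: cs =>
    if c = '\n' then c :: pvM true cs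
    else if b && PySem.Chars.isspace c then pvM b cs
    else c :: pvM false cs

lemma pv_cons_headI_tail (l : List (List Char)) (h : l ≠ []) : l.headI :: l.tail = l := by
  cases l with
  | nil => simp at h
  | cons a t => rfl

lemma pvSplit_ne_nil (l : List Char) : pvSplit l ≠ [] := by
  cases l with
  | nil => simp [pvSplit]
  | cons c cs => simp only [pvSplit]; split <;> simp

lemma pvGo_succ_cons (f : Nat) (c : Char) (rest cur : List Char) (acc : List (List Char)) :
    PySem.Chars.splitOn.go ['\n'] (f+1) (c::rest) cur acc
      = if ['\n'].isPrefixOf (c::rest) then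
          PySem.Chars.splitOn.go ['\n'] f (List.drop 1 (c::rest)) [] (cur.reverse::acc)
        else PySem.Chars.splitOn.go ['\n'] f rest (c::cur) acc := by
  rfl

lemma pvSplit_go (l : List Char) : ∀ (fuel : Nat) (cur : List Char) (acc : List (List Char)), l.length ≤ fuel →
    PySem.Chars.splitOn.go ['\n'] fuel l cur acc
      = acc.reverse ++ (cur.reverse ++ (pvSplit l).headI) :: (pvSplit l).tail := by
  induction l with
  | nil =>
    intro fuel cur acc _
    cases fuel <;> (rw [PySem.Chars.splitOn.go.eq_def]; simp [pvSplit])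
  | cons c rest ih =>
    intro fuel cur acc h
    cases fuel with
    | zero => simp at h
    | succ f =>
      rw [pvGo_succ_cons]
      by_cases hc : c = '\n'
      · subst hc
        rw [if_pos (by simp [List.isPrefixOf])]
        simp only [List.drop_succ_cons, List.drop_zero]
        rw [ih f [] (List.reverse cur :: acc) (by simp at h; omega)]
        simp [pvSplit]
        exact pv_cons_headI_tail _ (pvSplit_ne_nil rest)
      · rw [if_neg (by simp [List.isPrefixOf]; exact fun h => absurd h.symm hc)]
        rw [ih f (c :: cur) acc (by simp at h; omega)]
        simp [pvSplit, hc]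

lemma pvSplit_eq (l : List Char) :
    PySem.Chars.splitOn l ['\n'] = (pvSplit l).headI :: (pvSplit l).tail := by
  rw [PySem.Chars.splitOn, pvSplit_go l (l.length + 1) [] [] (by omega)]
  simp

lemma pvSplit_eq' (l : List Char) : PySem.Chars.splitOn l ['\n'] = pvSplit l := by
  rw [pvSplit_eq]
  exact pv_cons_headI_tail _ (pvSplit_ne_nil l)

-- the flattened "tail part": each non-first line lstripped and prefixed by '\n'
def pvTailJoin (l : List Char) : List Char :=
  ((pvSplit l).tail.map (fun s => '\n' :: PySem.Chars.lstrip s)).flatten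

lemma pvJoin_eq (parts : List (List Char)) (h : parts ≠ []) :
    PySem.Chars.join ['\n'] parts
      = parts.headI ++ (parts.tail.map (fun s => '\n' :: s)).flatten := by
  cases parts with
  | nil => simp at h
  | cons p ps =>
    simp only [PySem.Chars.join, List.headI, List.tail]
    induction ps generalizing p with
    | nil => simp [List.intercalate]
    | cons q qs ih =>
      have step : List.intercalate ['\n'] (p :: q :: qs)
          = p ++ ['\n'] ++ List.intercalate ['\n'] (q :: qs) := by
        simp [List.intercalate, List.intersperse]
      rw [step, ih q (by simp)]
      simp [List.append_assoc]

lemma pvM_spec (l : List Char) :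
    pvM true l = PySem.Chars.lstrip (pvSplit l).headI ++ pvTailJoin l ∧
    pvM false l = (pvSplit l).headI ++ pvTailJoin l := by
  induction l with
  | nil => simp [pvM, pvSplit, pvTailJoin, PySem.Chars.lstrip]
  | cons c cs ih =>
    obtain ⟨h0, t0, hsp⟩ : ∃ h0 t0, pvSplit cs = h0 :: t0 := by
      cases hq : pvSplit cs with
      | nil => exact absurd hq (pvSplit_ne_nil cs)
      | cons a b => exact ⟨a, b, rfl⟩
    by_cases hc : c = '\n'
    · subst hc
      constructor <;>
        simp [pvM, pvTailJoin, pvSplit, hsp, PySem.Chars.lstrip, ih.1]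
    · by_cases hw : PySem.Chars.isspace c = true
      · constructor
        · simp [pvM, hc, hw, pvTailJoin, pvSplit, hsp, PySem.Chars.lstrip, ih.1]
        · simp [pvM, hc, hw, pvTailJoin, pvSplit, hsp, ih.2]
      · have hw' : PySem.Chars.isspace c = false := by simpa using hw
        constructor <;>
          simp [pvM, hc, hw', pvTailJoin, pvSplit, hsp, PySem.Chars.lstrip, ih.2]

lemma pvFold_step (cs : List Char) : ∀ (acc : List Char) (b : Bool),
    (cs.foldl pvStep (acc, b)).1 = acc ++ pvM b cs := by
  induction cs with
  | nil => intro acc b; simp [pvM]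
  | cons c cs ih =>
    intro acc b
    by_cases hc : c = '\n'
    · subst hc; simp [pvStep, pvM, ih]
    · cases hb : (b && PySem.Chars.isspace c) with
      | true =>
        simp only [List.foldl_cons, pvStep, if_neg hc, hb, if_pos]
        have hb' : b = true := by revert hb; cases b <;> simp
        subst hb'
        rw [ih]
        simp [pvM, hc, hb]
      | false =>
        simp only [List.foldl_cons, pvStep, if_neg hc, hb, Bool.false_eq_true, if_false]
        rw [ih]
        simp [pvM, hc, hb]

-- one text's contribution in A equals pvM true of its chars
lemma pvText_eq (t : List Char) :
    PySem.Chars.join ['\n'] ((PySem.Chars.splitOn t ['\n']).map PySem.Chars.lstrip)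
      = pvM true t := by
  rw [pvSplit_eq', (pvM_spec t).1]
  rw [pvJoin_eq _ (by simp [pvSplit_ne_nil t])]
  cases hs : pvSplit t with
  | nil => exact absurd hs (pvSplit_ne_nil t)
  | cons h tl => simp [pvTailJoin, hs, List.map_map, Function.comp_def]

lemma pvJoinNil (l : List (List Char)) : PySem.Chars.join [] l = l.flatten := by
  cases l with
  | nil => simp [PySem.Chars.join, List.intercalate]
  | cons p ps =>
    induction ps generalizing p with
    | nil => simp [PySem.Chars.join, List.intercalate]
    | cons q qs ih =>
      have step : List.intercalate ([] : List Char) (p :: q :: qs)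
          = p ++ [] ++ List.intercalate [] (q :: qs) := by
        simp [List.intercalate, List.intersperse]
      simp only [PySem.Chars.join] at *
      rw [step, ih q]
      simp

lemma pvKey (ts : List String) : ∀ (pre : List (List Char)),
    (ts.foldl (fun (cleaned : List (List Char)) text =>
        cleaned ++ [PySem.Chars.join ['\n']
          ((PySem.Chars.splitOn text.toList ['\n']).map PySem.Chars.lstrip)]) pre)
      = pre ++ (ts.foldl (fun cleaned text =>
        cleaned ++ [PySem.Chars.join ['\n']
          ((PySem.Chars.splitOn text.toList ['\n']).map PySem.Chars.lstrip)]) []) := by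
  induction ts with
  | nil => intro pre; simp
  | cons u us ihu =>
    intro pre
    rw [List.foldl_cons, ihu, List.foldl_cons]
    simp only [List.nil_append]
    rw [ihu [_]]
    simp [List.append_assoc]

lemma pvMain (texts : List String) : ∀ (accB : List Char),
    (texts.foldl (fun (out : List Char) text => (text.toList.foldl pvStep (out, true)).1) accB)
      = accB ++ (texts.foldl (fun (cleaned : List (List Char)) text =>
            cleaned ++ [PySem.Chars.join ['\n']
              ((PySem.Chars.splitOn text.toList ['\n']).map PySem.Chars.lstrip)]) []).flatten := by
  induction texts with
  | nil => intro accB; simp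
  | cons t ts ih =>
    intro accB
    simp only [List.foldl_cons]
    rw [pvFold_step, ih (accB ++ pvM true t.toList), pvKey]
    simp [pvText_eq, List.append_assoc]

-- ===== VERDICT (by name: the statement is the Claim_ definition above) =====
theorem smart_lstrip_preserve_newlines_spec : Claim_equal_smart_lstrip_preserve_newlines := by
  intro texts _
  unfold Spec_smart_lstrip_preserve_newlines
  unfold smart_lstrip_preserve_newlines smart_lstrip_preserve_newlines_alt
  simp only []
  congr 1
  rw [pvMain texts [], pvJoinNil]
  simp
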